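-- pv_equiv track=rewrite | github.com/selaselah/mpinyin | mpinyin/__init__.py | _make_tone_inner
-- ===== SOURCE A (Python) =====
-- MARK = {
--     -1: u"aoeiuv\u00fc",
--     0: u"aoeiu\u00fc\u00fc",
--     1: u"\u0101\u014d\u0113\u012b\u016b\u01d6\u01d6",
--     2: u"\u00e1\u00f3\u00e9\u00ed\u00fa\u01d8\u01d8",
--     3: u"\u01ce\u01d2\u011b\u01d0\u01d4\u01da\u01da",
--     4: u"\u00e0\u00f2\u00e8\u00ec\u00f9\u01dc\u01dc",
-- }
--
-- def _make_tone_inner(py, tone):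
--     chs = [c for c in py]
--     for i in range(len(chs)):
--         r = len(chs) - 1 - i
--         mark_i = MARK[-1].find(chs[r])
--         if mark_i != -1:
--             chs[r] = MARK[tone][mark_i]
--             return ''.join(chs)
--     return py
-- ===== SOURCE B (Python) =====
-- MARK = {
--     -1: u"aoeiuv\u00fc",
--     0: u"aoeiu\u00fc\u00fc",
--     1: u"\u0101\u014d\u0113\u012b\u016b\u01d6\u01d6",
--     2: u"\u00e1\u00f3\u00e9\u00ed\u00fa\u01d8\u01d8",
--     3: u"\u01ce\u01d2\u011b\u01d0\u01d4\u01da\u01da",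
--     4: u"\u00e0\u00f2\u00e8\u00ec\u00f9\u01dc\u01dc",
-- }
--
-- def _make_tone_inner(py, tone):
--     # one forward pass: remember index and MARK-column of the LAST vowel seen
--     last = None
--     for i, ch in enumerate(py):
--         col = MARK[-1].find(ch)
--         if col != -1:
--             last = (i, col)
--     if last is None:
--         return py
--     i, col = last
--     chs = list(py)
--     chs[i] = MARK[tone][col]
--     return ''.join(chs)
-- ===== Notes on version B (the rewrite author's own statement) =====
-- stated objective: alternative
-- what changed: Replaces A's backward scan with early return by a single forward pass that tracks the index and MARK-column of the last vowel seen, then rewrites that one position after the loop.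
import Mathlib
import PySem

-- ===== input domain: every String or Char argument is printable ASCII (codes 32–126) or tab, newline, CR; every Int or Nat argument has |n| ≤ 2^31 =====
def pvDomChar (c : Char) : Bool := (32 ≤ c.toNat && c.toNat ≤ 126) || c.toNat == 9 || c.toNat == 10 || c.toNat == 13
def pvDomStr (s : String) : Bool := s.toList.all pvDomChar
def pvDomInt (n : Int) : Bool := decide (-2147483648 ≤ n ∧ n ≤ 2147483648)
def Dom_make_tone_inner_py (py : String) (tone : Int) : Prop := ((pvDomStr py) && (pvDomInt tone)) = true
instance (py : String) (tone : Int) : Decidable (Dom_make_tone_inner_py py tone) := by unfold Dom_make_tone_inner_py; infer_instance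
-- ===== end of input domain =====

-- B replaces A's backward scan (early return at the first vowel from the end) by a single
-- forward pass that keeps the index/column of the LAST vowel seen; objective: alternative.

-- shared module context: the MARK table (MARK[k]; "" stands for the missing key, excluded by Pre_)
def pvMARK (k : Int) : String :=
  if k = -1 then "aoeiuvü"
  else if k = 0 then "aoeiuüü"
  else if k = 1 then "āōēīūǖǖ"
  else if k = 2 then "áóéíúǘǘ"
  else if k = 3 then "ǎǒěǐǔǚǚ"
  else if k = 4 then "àòèìùǜǜ"
  else ""

-- ===== PORT A =====
-- MARK[-1].find(ch)  (ch a single character)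
def pvColOf (c : Char) : Int := PySem.Chars.find (pvMARK (-1)).toList [c]

-- MARK[tone][mark_i]  (in range whenever tone is a key; default ' ' is never reached under Pre_)
def pvMarkChar (tone : Int) (mark_i : Int) : Char :=
  PySem.List.pyGetD (pvMARK tone).toList mark_i ' '

-- the for-loop of A: fuel k+1 means the iteration examining r = k is next (r runs len-1 … 0)
def pvAGo (chs : List Char) (tone : Int) (py : String) : Nat → String
  | 0 => py
  | Nat.succ k =>
      let r := k
      let mark_i := pvColOf (chs.getD r ' ')
      if mark_i ≠ -1 then String.ofList (chs.set r (pvMarkChar tone mark_i))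
      else pvAGo chs tone py k

def make_tone_inner_py (py : String) (tone : Int) : String :=
  pvAGo py.toList tone py py.toList.length

-- ===== PORT B =====
-- forward pass over enumerate(py), overwriting (index, column) at every vowel
def pvBScan (l : List Char) (i : Nat) (acc : Option (Nat × Int)) : Option (Nat × Int) :=
  match l with
  | [] => acc
  | c :: rest =>
      let col := pvColOf c
      pvBScan rest (i + 1) (if col ≠ -1 then some (i, col) else acc)

def make_tone_inner_py_alt (py : String) (tone : Int) : String :=
  match pvBScan py.toList 0 none with
  | none => py
  | some (i, col) => String.ofList (py.toList.set i (pvMarkChar tone col))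

-- ===== PRECONDITION & SPEC =====
-- Pre_ excludes exactly the KeyError inputs: tone not a MARK key while py contains a vowel
-- (there A raises, and B raises identically).
def Pre_make_tone_inner_py (py : String) (tone : Int) : Prop :=
  (-1 ≤ tone ∧ tone ≤ 4) ∨ ∀ c ∈ py.toList, c ∉ "aoeiuvü".toList
instance (py : String) (tone : Int) : Decidable (Pre_make_tone_inner_py py tone) := by
  unfold Pre_make_tone_inner_py; infer_instance

def pvWitness_make_tone_inner_py : String × Int := ("hao", 3)

def Spec_make_tone_inner_py (py : String) (tone : Int) (out : String) : Prop := out = make_tone_inner_py_alt py tone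
instance (py : String) (tone : Int) (out : String) : Decidable (Spec_make_tone_inner_py py tone out) := by unfold Spec_make_tone_inner_py; infer_instance

-- ===== CLAIM (what is proved, stated in full; the proofs are below) =====
def Claim_equal_make_tone_inner_py : Prop := ∀ (py : String) (tone : Int), Dom_make_tone_inner_py py tone → Pre_make_tone_inner_py py tone → Spec_make_tone_inner_py py tone (make_tone_inner_py py tone)

-- ===== LEMMAS AND PROOFS =====

-- proof-side characterisation: the last vowel (index, column) among positions < k of chs
def pvLastBelow (chs : List Char) : Nat → Option (Nat × Int)
  | 0 => none
  | Nat.succ k =>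
      let col := pvColOf (chs.getD k ' ')
      if col ≠ -1 then some (k, col) else pvLastBelow chs k

theorem pvAGo_eq (chs : List Char) (tone : Int) (py : String) (k : Nat) :
    pvAGo chs tone py k =
      match pvLastBelow chs k with
      | none => py
      | some (r, c) => String.ofList (chs.set r (pvMarkChar tone c)) := by
  induction k with
  | zero => simp [pvAGo, pvLastBelow]
  | succ k ih =>
      simp only [pvAGo, pvLastBelow, List.getD]
      rw [ih]
      by_cases h : pvColOf (chs[k]?.getD ' ') = -1
      · simp [h]
      · simp [h]

theorem pvLastBelow_append (pre l : List Char) (k : Nat) (hk : k ≤ pre.length) :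
    pvLastBelow (pre ++ l) k = pvLastBelow pre k := by
  induction k with
  | zero => rfl
  | succ k ih =>
      have hlt : k < pre.length := by omega
      have hg : (pre ++ l).getD k ' ' = pre.getD k ' ' := by
        simp [List.getD, List.getElem?_append_left hlt]
      simp only [pvLastBelow, hg, ih (by omega)]

theorem pvBScan_eq (l : List Char) (pre : List Char) :
    pvBScan l pre.length (pvLastBelow pre pre.length) =
      pvLastBelow (pre ++ l) (pre ++ l).length := by
  induction l generalizing pre with
  | nil => simp [pvBScan]
  | cons c rest ih =>
      have h2 := ih (pre ++ [c])
      have hg : (pre ++ [c]).getD pre.length ' ' = c := by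
        simp [List.getD]
      have hstep : pvLastBelow (pre ++ [c]) ((pre ++ [c]).length) =
          if pvColOf c ≠ -1 then some (pre.length, pvColOf c) else pvLastBelow pre pre.length := by
        rw [show (pre ++ [c]).length = pre.length + 1 by simp]
        simp only [pvLastBelow, hg, pvLastBelow_append pre [c] pre.length le_rfl]
      rw [hstep] at h2
      simp only [List.length_append, List.length_cons, List.append_assoc,
        List.singleton_append, List.length_nil, Nat.zero_add] at h2
      simp only [pvBScan, List.length_append, List.length_cons]
      exact h2

theorem make_tone_inner_py_spec : Claim_equal_make_tone_inner_py := by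
  intro py tone _ _
  unfold Spec_make_tone_inner_py make_tone_inner_py make_tone_inner_py_alt
  have hb := pvBScan_eq py.toList []
  simp only [List.length_nil, List.nil_append] at hb
  rw [show pvLastBelow [] 0 = none from rfl] at hb
  rw [hb, pvAGo_eq]
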